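-- pv_equiv track=rewrite | github.com/ruizsugliani/TDA---Podberezki-2025---1C | Ejercicios/DyC/02.py | _menor_no_incluido
-- ===== SOURCE A (Python) =====
-- def _menor_no_incluido(arr, ini, fin):
--     if fin <= ini:
--         return None
--
--     c = (ini + fin) // 2
--     res_izq = _menor_no_incluido(arr, ini, c)
--     res_der = _menor_no_incluido(arr, c+1, fin)
--
--     if res_izq is not None:
--         return res_izq
--
--     if arr[c+1] - arr[c] > 1:
--         return arr[c] + 1
--
--     return res_der
-- ===== SOURCE B (Python) =====
-- def _menor_no_incluido(arr, ini, fin):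
--     for c in range(ini, fin):
--         if arr[c + 1] - arr[c] > 1:
--             return arr[c] + 1
--     return None
-- ===== Notes on version B (the rewrite author's own statement) =====
-- stated objective: simpler
-- what changed: Replaced the divide-and-conquer recursion (which checks adjacent pairs in left-to-right in-order anyway) by a single direct left-to-right scan returning at the first adjacent pair with a gap > 1.
-- outside the precondition, e.g. on _menor_no_incluido([0, 5, -4, -5, 1], 0, 5): A returns 1, B returns 1
import Mathlib
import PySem

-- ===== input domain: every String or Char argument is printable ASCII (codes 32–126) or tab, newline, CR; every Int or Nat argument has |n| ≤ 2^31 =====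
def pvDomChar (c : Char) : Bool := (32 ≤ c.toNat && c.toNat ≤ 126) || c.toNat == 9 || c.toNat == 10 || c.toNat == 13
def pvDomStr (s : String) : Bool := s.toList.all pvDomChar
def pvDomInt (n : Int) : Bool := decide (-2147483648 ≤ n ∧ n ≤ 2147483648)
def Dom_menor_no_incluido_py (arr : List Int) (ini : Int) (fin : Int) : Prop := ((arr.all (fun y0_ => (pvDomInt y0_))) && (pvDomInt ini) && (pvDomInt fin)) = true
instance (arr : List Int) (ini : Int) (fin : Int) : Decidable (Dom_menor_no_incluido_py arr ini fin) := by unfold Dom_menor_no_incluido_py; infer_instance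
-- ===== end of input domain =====

-- B replaces A's divide-and-conquer recursion by a single left-to-right scan for
-- the first adjacent gap; same O(n) work, simpler and with O(1) space.


-- ===== PORT A =====
def menor_no_incluido_py (arr : List Int) (ini : Int) (fin : Int) : Option Int :=
  if _h : fin ≤ ini then none
  else
    let c := PySem.Int.floordiv (ini + fin) 2
    let res_izq := menor_no_incluido_py arr ini c
    let res_der := menor_no_incluido_py arr (c + 1) fin
    match res_izq with
    | some v => some v
    | none =>
      match PySem.List.pyGet? arr (c + 1), PySem.List.pyGet? arr c with
      | some a1, some a0 => if a1 - a0 > 1 then some (a0 + 1) else res_der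
      | _, _ => none  -- IndexError in Python; such inputs lie outside Pre_
termination_by (fin - ini).toNat
decreasing_by
  · have h2 : PySem.Int.floordiv (ini + fin) 2 < fin :=
      (PySem.Int.floordiv_lt_iff_lt_mul (by omega)).mpr (by omega)
    omega
  · have h1 : ini ≤ PySem.Int.floordiv (ini + fin) 2 :=
      (PySem.Int.le_floordiv_iff_mul_le (by omega)).mpr (by omega)
    omega

-- ===== PORT B =====
-- the 'for c in range(ini, fin)' loop of Source B, as structural recursion over the range list
def pvScan (arr : List Int) : List Int → Option Int
  | [] => none
  | c :: rest =>
    -- arr[c+1] is evaluated first, then arr[c] (Python's evaluation order)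
    match PySem.List.pyGet? arr (c + 1) with
    | none => none  -- IndexError in Python; such inputs lie outside Pre_
    | some a1 =>
      match PySem.List.pyGet? arr c with
      | none => none  -- IndexError in Python; such inputs lie outside Pre_
      | some a0 => if a1 - a0 > 1 then some (a0 + 1) else pvScan arr rest

def menor_no_incluido_py_alt (arr : List Int) (ini : Int) (fin : Int) : Option Int :=
  pvScan arr (PySem.List.pyRange ini fin 1)

-- ===== PRECONDITION & SPEC =====
-- Pre_ excludes calls whose index range reaches outside the array bounds: A raises
-- IndexError on almost all of them, returning only accidentally when a gap happens to
-- precede the out-of-range index (and there B returns the same value; see cites).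
def Pre_menor_no_incluido_py (arr : List Int) (ini : Int) (fin : Int) : Prop :=
  fin ≤ ini ∨ (-(arr.length : Int) ≤ ini ∧ fin < (arr.length : Int))
instance (arr : List Int) (ini : Int) (fin : Int) : Decidable (Pre_menor_no_incluido_py arr ini fin) := by
  unfold Pre_menor_no_incluido_py; infer_instance

def pvWitness_menor_no_incluido_py : List Int × Int × Int := ([3, 4, 7], 0, 2)

def Spec_menor_no_incluido_py (arr : List Int) (ini : Int) (fin : Int) (out : Option Int) : Prop := out = menor_no_incluido_py_alt arr ini fin
instance (arr : List Int) (ini : Int) (fin : Int) (out : Option Int) : Decidable (Spec_menor_no_incluido_py arr ini fin out) := by unfold Spec_menor_no_incluido_py; infer_instance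

-- ===== CLAIM (what is proved, stated in full; the proofs are below) =====
def Claim_equal_menor_no_incluido_py : Prop := ∀ (arr : List Int) (ini : Int) (fin : Int), Dom_menor_no_incluido_py arr ini fin → Pre_menor_no_incluido_py arr ini fin → Spec_menor_no_incluido_py arr ini fin (menor_no_incluido_py arr ini fin)

-- ===== LEMMAS AND PROOFS =====

-- when every element of l1 is a valid check position, the scan distributes over ++
theorem pvScan_append (arr : List Int) (l1 l2 : List Int)
    (h : ∀ c ∈ l1, (PySem.List.pyGet? arr (c + 1)).isSome ∧ (PySem.List.pyGet? arr c).isSome) :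
    pvScan arr (l1 ++ l2) =
      match pvScan arr l1 with
      | some v => some v
      | none => pvScan arr l2 := by
  induction l1 with
  | nil => simp [pvScan]
  | cons c rest ih =>
    obtain ⟨h1, h0⟩ := h c (by simp)
    obtain ⟨a1, ha1⟩ := Option.isSome_iff_exists.mp h1
    obtain ⟨a0, ha0⟩ := Option.isSome_iff_exists.mp h0
    simp only [List.cons_append, pvScan, ha1, ha0]
    split
    · rfl
    · exact ih (fun x hx => h x (by simp [hx]))

theorem pvGet_some (arr : List Int) (i : Int)
    (hlo : -(arr.length : Int) ≤ i) (hhi : i < (arr.length : Int)) :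
    ∃ a, PySem.List.pyGet? arr i = some a := by
  rcases hv : PySem.List.pyGet? arr i with _ | a
  · exfalso
    have := (PySem.List.pyGet?_eq_none_iff arr i).mp hv
    exact this (by simp [PySem.Raise.InRange]; omega)
  · exact ⟨a, rfl⟩

theorem pvMain : ∀ (n : Nat) (arr : List Int) (ini fin : Int), (fin - ini).toNat ≤ n →
    Pre_menor_no_incluido_py arr ini fin →
    menor_no_incluido_py arr ini fin = pvScan arr (PySem.List.pyRange ini fin 1) := by
  intro n
  induction n with
  | zero =>
    intro arr ini fin hn _
    have hfi : fin ≤ ini := by omega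
    rw [menor_no_incluido_py, dif_pos hfi]
    have : PySem.List.pyRange ini fin 1 = [] := by
      simp [PySem.List.pyRange_one, show (fin - ini).toNat = 0 by omega]
    rw [this]; rfl
  | succ n ih =>
    intro arr ini fin hn hpre
    by_cases hfi : fin ≤ ini
    · rw [menor_no_incluido_py, dif_pos hfi]
      have : PySem.List.pyRange ini fin 1 = [] := by
        simp [PySem.List.pyRange_one, show (fin - ini).toNat = 0 by omega]
      rw [this]; rfl
    · have hbounds : -(arr.length : Int) ≤ ini ∧ fin < (arr.length : Int) := by
        rcases hpre with h | h
        · omega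
        · exact h
      obtain ⟨hlo, hhi⟩ := hbounds
      set c := PySem.Int.floordiv (ini + fin) 2 with hc
      have hc1 : ini ≤ c := (PySem.Int.le_floordiv_iff_mul_le (by omega)).mpr (by omega)
      have hc2 : c < fin := (PySem.Int.floordiv_lt_iff_lt_mul (by omega)).mpr (by omega)
      -- split the range at c
      have hsplit : PySem.List.pyRange ini fin 1 =
          PySem.List.pyRange ini c 1 ++ (c :: PySem.List.pyRange (c + 1) fin 1) := by
        rw [PySem.List.pyRange_one_append ini c fin hc1 (by omega),
            PySem.List.pyRange_one_cons hc2]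
      have hvalid : ∀ x ∈ PySem.List.pyRange ini c 1,
          (PySem.List.pyGet? arr (x + 1)).isSome ∧ (PySem.List.pyGet? arr x).isSome := by
        intro x hx
        have hb := PySem.List.mem_pyRange_one.mp hx
        obtain ⟨a1, ha1⟩ := pvGet_some arr (x + 1) (by omega) (by omega)
        obtain ⟨a0, ha0⟩ := pvGet_some arr x (by omega) (by omega)
        exact ⟨by simp [ha1], by simp [ha0]⟩
      have hizq : menor_no_incluido_py arr ini c = pvScan arr (PySem.List.pyRange ini c 1) :=
        ih arr ini c (by omega) (Or.inr ⟨by omega, by omega⟩)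
      have hder : menor_no_incluido_py arr (c + 1) fin =
          pvScan arr (PySem.List.pyRange (c + 1) fin 1) :=
        ih arr (c + 1) fin (by omega) (Or.inr ⟨by omega, by omega⟩)
      obtain ⟨a1, ha1⟩ := pvGet_some arr (c + 1) (by omega) (by omega)
      obtain ⟨a0, ha0⟩ := pvGet_some arr c (by omega) (by omega)
      rw [menor_no_incluido_py, dif_neg hfi]
      simp only [← hc, hizq, hder, hsplit, pvScan_append arr _ _ hvalid]
      rcases pvScan arr (PySem.List.pyRange ini c 1) with _ | v
      · simp only [pvScan, ha1, ha0]
      · rfl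

-- ===== VERDICT (by name: the statement is the Claim_ definition above) =====
theorem menor_no_incluido_py_spec : Claim_equal_menor_no_incluido_py := by
  intro arr ini fin _ hpre
  unfold Spec_menor_no_incluido_py menor_no_incluido_py_alt
  exact pvMain (fin - ini).toNat arr ini fin (le_refl _) hpre
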